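-- pv_equiv track=rewrite | github.com/smuktevi/uw515 | tests/test_email_validity.py | check_file_format
-- ===== SOURCE A (Python) =====
-- def check_file_format(file_data):
--         valid_email_format = {"From:":0, "Date:":0, "Subject:":0}
--         for line in file_data:
--             words = line.split()
--             if len(words)>0:
--                 if words[0] in valid_email_format:
--                     valid_email_format[words[0]] = 1
--                 if len(words) == 1 and words[0] == '\n':
--                     break
--             if sum(valid_email_format.values())==3:
--                 return True
--         return False
-- ===== SOURCE B (Python) =====
-- def check_file_format(file_data):
--     def seen(header):
--         for line in file_data:
--             ws = line.split()
--             if ws and ws[0] == header: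
--                 return True
--         return False
--     return seen("From:") and seen("Date:") and seen("Subject:")
-- ===== Notes on version B (the rewrite author's own statement) =====
-- stated objective: simpler
-- what changed: Swaps the quantifier order: instead of A's single line-major pass maintaining a dict of three flags with a per-line sum check and early return, B runs one independent scan per required header (header-major, three staged passes with no mutable state) and conjoins the three results; each scan stops at its first match and short-circuits when an earlier header is absent.
import Mathlib
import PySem

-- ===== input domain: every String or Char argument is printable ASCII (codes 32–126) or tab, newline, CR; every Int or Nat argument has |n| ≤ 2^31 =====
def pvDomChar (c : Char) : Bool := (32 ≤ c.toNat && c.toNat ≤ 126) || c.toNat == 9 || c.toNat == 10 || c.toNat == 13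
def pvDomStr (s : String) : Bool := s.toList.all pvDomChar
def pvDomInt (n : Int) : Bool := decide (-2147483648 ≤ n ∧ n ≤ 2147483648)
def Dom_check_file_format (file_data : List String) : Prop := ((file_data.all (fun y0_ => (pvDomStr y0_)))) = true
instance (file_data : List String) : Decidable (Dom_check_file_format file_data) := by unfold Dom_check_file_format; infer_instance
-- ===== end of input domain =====

-- B swaps the quantifier order: one independent scan per required header (three
-- staged passes, no mutable flag state) instead of A's line-major pass over a
-- dict of flags with a per-line sum check (objective: simpler).

-- ===== PORT A =====
-- the for-loop of A, with the dict of flags as the accumulator; `false` on falling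
-- off the list is the trailing `return False`
def checkLoopA : List String → PySem.Dict String Int → Bool
  | [], _ => false
  | line :: rest, d =>
    match PySem.Str.split₀ line with
    | [] =>
      -- len(words) > 0 is false; only the sum check runs
      if (PySem.Dict.values d).sum == 3 then true else checkLoopA rest d
    | w :: ws =>
      let d' := if PySem.Dict.contains d w then PySem.Dict.insert d w 1 else d
      if ws.length == 0 && w == "\n" then false   -- the break, then `return False`
      else if (PySem.Dict.values d').sum == 3 then true else checkLoopA rest d'

def check_file_format (file_data : List String) : Bool :=
  checkLoopA file_data
    (PySem.Dict.ofList [("From:", (0 : Int)), ("Date:", 0), ("Subject:", 0)])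

-- ===== PORT B =====
-- the inner `seen(header)` loop of Source B: scan the lines for one header
def seenB (header : String) : List String → Bool
  | [] => false
  | line :: rest =>
    match PySem.Str.split₀ line with
    | [] => seenB header rest
    | w :: _ => if w == header then true else seenB header rest

def check_file_format_alt (file_data : List String) : Bool :=
  seenB "From:" file_data && seenB "Date:" file_data && seenB "Subject:" file_data

-- ===== PRECONDITION & SPEC =====
def Spec_check_file_format (file_data : List String) (out : Bool) : Prop := out = check_file_format_alt file_data
instance (file_data : List String) (out : Bool) : Decidable (Spec_check_file_format file_data out) := by unfold Spec_check_file_format; infer_instance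

-- ===== CLAIM (what is proved, stated in full; the proofs are below) =====
def Claim_equal_check_file_format : Prop := ∀ (file_data : List String), Dom_check_file_format file_data → Spec_check_file_format file_data (check_file_format file_data)

-- ===== LEMMAS AND PROOFS =====

-- tokens produced by split₀ contain no whitespace characters
theorem split₀_go_no_ws (s cur : List Char) (acc : List (List Char))
    (hcur : ∀ c ∈ cur, PySem.Chars.isspace c = false)
    (hacc : ∀ w ∈ acc, ∀ c ∈ w, PySem.Chars.isspace c = false) :
    ∀ w ∈ PySem.Chars.split₀.go s cur acc, ∀ c ∈ w, PySem.Chars.isspace c = false := by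
  induction s generalizing cur acc with
  | nil =>
    intro w hw
    unfold PySem.Chars.split₀.go at hw
    split at hw
    · simpa using hacc w (by simpa using hw)
    · simp only [List.mem_reverse, List.mem_cons] at hw
      rcases hw with h | h
      · subst h; intro c hc; exact hcur c (by simpa using hc)
      · exact hacc w h
  | cons c rest ih =>
    intro w hw
    unfold PySem.Chars.split₀.go at hw
    split at hw
    · split at hw
      · exact ih [] acc (by simp) hacc w hw
      · refine ih [] (cur.reverse :: acc) (by simp) ?_ w hw
        intro v hv
        rcases List.mem_cons.mp hv with h | h
        · subst h; intro x hx; exact hcur x (by simpa using hx)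
        · exact hacc v h
    · rename_i hns
      refine ih (c :: cur) acc ?_ hacc w hw
      intro x hx
      rcases List.mem_cons.mp hx with h | h
      · simpa [h] using hns
      · exact hcur x h

theorem first_ne_newline (line w : String) (ws : List String)
    (h : PySem.Str.split₀ line = w :: ws) : w ≠ "\n" := by
  intro he
  subst he
  have : ("\n" : String).toList ∈ PySem.Chars.split₀ line.toList := by
    have := congrArg (List.map String.toList) h
    simp only [PySem.Str.split₀, List.map_map, List.map_cons] at this
    have h2 : PySem.Chars.split₀ line.toList = ("\n" : String).toList :: ws.map String.toList := by
      have hid : (PySem.Chars.split₀ line.toList).map (String.toList ∘ String.ofList) =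
          PySem.Chars.split₀ line.toList := by
        simp [Function.comp_def, String.toList_ofList]
      rw [← hid]; exact this
    rw [h2]; exact List.mem_cons_self ..
  have := split₀_go_no_ws line.toList [] [] (by simp) (by simp) _ this '\n' (by decide)
  simp [PySem.Chars.isspace] at this

-- the first token of a line, if any
def firstTok (line : String) : Option String := (PySem.Str.split₀ line).head?

def hasFirst (l : List String) (h : String) : Bool :=
  l.any (fun line => firstTok line == some h)

-- the dict state of A's loop, as a function of three flags
def d3 (f dt sb : Bool) : PySem.Dict String Int :=
  PySem.Dict.mk [("From:", if f then 1 else 0), ("Date:", if dt then 1 else 0),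
                 ("Subject:", if sb then 1 else 0)]

theorem d3_init : PySem.Dict.ofList [("From:", (0 : Int)), ("Date:", 0), ("Subject:", 0)] =
    d3 false false false := by decide

theorem d3_sum (f dt sb : Bool) :
    ((PySem.Dict.values (d3 f dt sb)).sum == 3) = (f && dt && sb) := by
  cases f <;> cases dt <;> cases sb <;> decide

theorem d3_step (f dt sb : Bool) (w : String) :
    (if PySem.Dict.contains (d3 f dt sb) w then PySem.Dict.insert (d3 f dt sb) w 1
     else d3 f dt sb) =
    d3 (f || (w == "From:")) (dt || (w == "Date:")) (sb || (w == "Subject:")) := by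
  by_cases h1 : w = "From:"
  · subst h1; cases f <;> cases dt <;> cases sb <;> decide
  by_cases h2 : w = "Date:"
  · subst h2; cases f <;> cases dt <;> cases sb <;> decide
  by_cases h3 : w = "Subject:"
  · subst h3; cases f <;> cases dt <;> cases sb <;> decide
  have e1 : (w == "From:") = false := by simp [h1]
  have e2 : (w == "Date:") = false := by simp [h2]
  have e3 : (w == "Subject:") = false := by simp [h3]
  have hc : PySem.Dict.contains (d3 f dt sb) w = false := by
    simp [d3, PySem.Dict.contains]
    exact ⟨fun he => h1 he.symm, fun he => h2 he.symm, fun he => h3 he.symm⟩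
  simp [hc, e1, e2, e3]

theorem checkLoopA_eq (l : List String) (f dt sb : Bool) (hne : (f && dt && sb) = false) :
    checkLoopA l (d3 f dt sb) =
      ((f || hasFirst l "From:") && (dt || hasFirst l "Date:") && (sb || hasFirst l "Subject:")) := by
  induction l generalizing f dt sb with
  | nil => cases f <;> cases dt <;> cases sb <;> simp_all [checkLoopA, hasFirst]
  | cons line rest ih =>
    rw [checkLoopA]
    cases hws : PySem.Str.split₀ line with
    | nil =>
      rw [d3_sum, hne, if_neg (by simp), ih f dt sb hne]
      simp [hasFirst, firstTok, hws]
    | cons w ws =>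
      simp only [d3_step]
      rw [if_neg (by simpa using fun _ => first_ne_newline line w ws hws), d3_sum]
      have hh : ∀ h : String, hasFirst (line :: rest) h = ((w == h) || hasFirst rest h) := by
        intro h; simp [hasFirst, firstTok, hws]
      by_cases hall : ((f || (w == "From:")) && (dt || (w == "Date:")) && (sb || (w == "Subject:"))) = true
      · rw [if_pos hall, hh, hh, hh]
        revert hall
        cases f <;> cases dt <;> cases sb <;> cases hw1 : (w == "From:") <;>
          cases hw2 : (w == "Date:") <;> cases hw3 : (w == "Subject:") <;> simp
      · rw [if_neg hall, ih _ _ _ (by simpa using hall), hh, hh, hh]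
        cases f <;> cases dt <;> cases sb <;> cases hw1 : (w == "From:") <;>
          cases hw2 : (w == "Date:") <;> cases hw3 : (w == "Subject:") <;> simp

-- B's per-header scan agrees with the "some line's first token is h" predicate
theorem seenB_eq (h : String) (l : List String) : seenB h l = hasFirst l h := by
  induction l with
  | nil => simp [seenB, hasFirst]
  | cons line rest ih =>
    rw [seenB]
    cases hws : PySem.Str.split₀ line with
    | nil => simp [hasFirst, firstTok, hws, ih]
    | cons w ws =>
      by_cases hw : w = h
      · simp [hasFirst, firstTok, hws, hw]
      · simp [hasFirst, firstTok, hws, hw, ih]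

-- ===== VERDICT (by name: the statement is the Claim_ definition above) =====
theorem check_file_format_spec : Claim_equal_check_file_format := by
  intro l _
  unfold Spec_check_file_format check_file_format check_file_format_alt
  rw [d3_init, checkLoopA_eq l false false false (by decide),
    seenB_eq, seenB_eq, seenB_eq]
  simp
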